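-- pv_equiv track=rewrite | github.com/evanphoward/AdventOfCode | AOC_15/Day24/main.py | min_qe
-- ===== SOURCE A (Python) =====
-- def min_qe(subsets):
--     ideal_length = min(len(x) for x in subsets)
--     qes = []
--     for subset in list(filter(lambda x: len(x) == ideal_length, subsets)):
--         ans = 1
--         for weight in subset:
--             ans *= weight
--         qes.append(ans)
--     return min(qes)
-- ===== SOURCE B (Python) =====
-- def min_qe(subsets):
--     def prod(s):
--         r = 1
--         for w in s:
--             r *= w
--         return r
--     return min((len(s), prod(s)) for s in subsets)[1]
-- ===== Notes on version B (the rewrite author's own statement) =====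
-- stated objective: simpler
-- what changed: Single pass taking the lexicographic minimum of (length, product) pairs replaces A's two-phase compute-minimal-length, filter, collect-products, then min.
import Mathlib
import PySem

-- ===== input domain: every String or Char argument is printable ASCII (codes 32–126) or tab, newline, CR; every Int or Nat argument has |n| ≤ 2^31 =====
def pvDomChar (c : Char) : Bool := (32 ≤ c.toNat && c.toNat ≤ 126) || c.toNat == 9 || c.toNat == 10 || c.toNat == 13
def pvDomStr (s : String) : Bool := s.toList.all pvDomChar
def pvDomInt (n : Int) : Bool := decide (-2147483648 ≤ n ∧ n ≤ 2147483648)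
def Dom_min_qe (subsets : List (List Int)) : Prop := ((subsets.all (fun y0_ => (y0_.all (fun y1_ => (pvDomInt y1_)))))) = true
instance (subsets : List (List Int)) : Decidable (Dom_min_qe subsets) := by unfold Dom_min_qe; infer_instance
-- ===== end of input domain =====

-- B replaces A's two-phase min-length-then-filter-then-min-product with a single
-- lexicographic min over (length, product) pairs; equally fast, simpler.


-- ===== PORT A =====
def min_qe (subsets : List (List Int)) : Int :=
  match PySem.List.min? (subsets.map (fun x => (x.length : Int))) (fun y => y) with
  | none => 0  -- ValueError: min() of empty generator; excluded by Pre_min_qe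
  | some ideal_length =>
    let qes : List Int :=
      (subsets.filter (fun x => (x.length : Int) == ideal_length)).foldl
        (fun qes subset => qes ++ [subset.foldl (fun ans weight => ans * weight) 1]) []
    match PySem.List.min? qes (fun y => y) with
    | none => 0  -- unreachable when subsets ≠ []
    | some m => m

-- ===== PORT B =====
-- Source B's helper prod(s): ans = 1; for w in s: ans *= w
def pvProd (s : List Int) : Int := s.foldl (fun r w => r * w) 1

def min_qe_alt (subsets : List (List Int)) : Int :=
  match PySem.List.min2? (subsets.map (fun s => ((s.length : Int), pvProd s)))
      Prod.fst Prod.snd with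
  | none => 0  -- ValueError: min() of empty generator; excluded by Pre_min_qe
  | some p => p.2

-- ===== PRECONDITION & SPEC =====
-- Python's min() raises ValueError on an empty argument: A (and B) raise exactly when subsets = [].
def Pre_min_qe (subsets : List (List Int)) : Prop := subsets ≠ []
instance (subsets : List (List Int)) : Decidable (Pre_min_qe subsets) := by unfold Pre_min_qe; infer_instance

def pvWitness_min_qe : List (List Int) := [[2], [3, 4]]

def Spec_min_qe (subsets : List (List Int)) (out : Int) : Prop := out = min_qe_alt subsets
instance (subsets : List (List Int)) (out : Int) : Decidable (Spec_min_qe subsets out) := by unfold Spec_min_qe; infer_instance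

-- ===== CLAIM (what is proved, stated in full; the proofs are below) =====
def Claim_equal_min_qe : Prop := ∀ (subsets : List (List Int)), Dom_min_qe subsets → Pre_min_qe subsets → Spec_min_qe subsets (min_qe subsets)

-- ===== LEMMAS AND PROOFS =====

-- lexicographic ≤ on Int pairs (the order Python uses to compare the (len, prod) tuples)
def lexle (a b : Int × Int) : Prop := a.1 < b.1 ∨ (a.1 = b.1 ∧ a.2 ≤ b.2)

theorem lexle_refl (a : Int × Int) : lexle a a := by unfold lexle; omega

theorem lexle_trans {a b c : Int × Int} (h1 : lexle a b) (h2 : lexle b c) : lexle a c := by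
  unfold lexle at *; omega

theorem lexle_antisymm {a b : Int × Int} (h1 : lexle a b) (h2 : lexle b a) : a = b := by
  unfold lexle at *
  have : a.1 = b.1 ∧ a.2 = b.2 := by omega
  exact Prod.ext this.1 this.2

-- min2? on a nonempty list returns a lexicographic minimum of its elements
theorem min2_cons_spec (ps : List (Int × Int)) (a : Int × Int) :
    ∃ r, PySem.List.min2? (a :: ps) Prod.fst Prod.snd = some r ∧
      (r = a ∨ r ∈ ps) ∧ lexle r a ∧ ∀ p ∈ ps, lexle r p := by
  induction ps generalizing a with
  | nil =>
    refine ⟨a, ?_, Or.inl rfl, lexle_refl a, by simp⟩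
    simp [PySem.List.min2?]
  | cons p t ih =>
    have hstep : PySem.List.min2? (a :: p :: t) Prod.fst Prod.snd
        = PySem.List.min2?
            ((if (decide (p.1 < a.1) || !decide (a.1 < p.1) && decide (p.2 < a.2)) = true
              then p else a) :: t) Prod.fst Prod.snd := by
      simp only [PySem.List.min2?, List.foldl_cons]
      split <;> rfl
    by_cases hc : (decide (p.1 < a.1) || !decide (a.1 < p.1) && decide (p.2 < a.2)) = true
    · obtain ⟨r, hr, hmem, hle, hall⟩ := ih p
      have hpa : lexle p a := by
        simp only [Bool.or_eq_true, Bool.and_eq_true, Bool.not_eq_true', decide_eq_true_eq,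
          decide_eq_false_iff_not] at hc
        unfold lexle; omega
      refine ⟨r, ?_, ?_, lexle_trans hle hpa, ?_⟩
      · rw [hstep, if_pos hc]; exact hr
      · rcases hmem with h | h
        · exact Or.inr (by simp [h])
        · exact Or.inr (List.mem_cons_of_mem _ h)
      · intro q hq
        rcases List.mem_cons.mp hq with h | h
        · exact h ▸ hle
        · exact hall q h
    · obtain ⟨r, hr, hmem, hle, hall⟩ := ih a
      have hap : lexle a p := by
        simp only [Bool.or_eq_true, Bool.and_eq_true, Bool.not_eq_true', decide_eq_true_eq,
          decide_eq_false_iff_not] at hc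
        unfold lexle; omega
      refine ⟨r, ?_, ?_, hle, ?_⟩
      · rw [hstep, if_neg hc]; exact hr
      · rcases hmem with h | h
        · exact Or.inl h
        · exact Or.inr (List.mem_cons_of_mem _ h)
      · intro q hq
        rcases List.mem_cons.mp hq with h | h
        · exact h ▸ lexle_trans hle hap
        · exact hall q h

theorem min_qe_spec : Claim_equal_min_qe := by
  intro subsets _ hpre
  unfold Spec_min_qe
  cases subsets with
  | nil => exact absurd rfl hpre
  | cons s t =>
    -- notation
    set pairf : List Int → Int × Int := fun u => ((u.length : Int), pvProd u) with hpairf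
    -- ===== A side =====
    have hideal : PySem.List.min? ((s :: t).map (fun x => (x.length : Int))) (fun y => y)
        = some (List.foldl min (s.length : Int) (t.map (fun x => (x.length : Int)))) := by
      simp [PySem.List.min?_id_cons]
    set ideal : Int := List.foldl min (s.length : Int) (t.map (fun x => (x.length : Int))) with hid
    -- ideal is ≤ every length and is attained
    have hle0 := PySem.List.foldl_min_le (t.map (fun x => (x.length : Int))) (s.length : Int)
    have hle : ∀ u ∈ s :: t, ideal ≤ (u.length : Int) := by
      intro u hu
      rcases List.mem_cons.mp hu with h | h
      · exact h ▸ hle0.1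
      · exact hle0.2 _ (List.mem_map_of_mem h)
    have hatt : ∃ u ∈ s :: t, (u.length : Int) = ideal := by
      rcases PySem.List.foldl_min_mem (t.map (fun x => (x.length : Int))) (s.length : Int) with h | h
      · exact ⟨s, List.mem_cons_self, h.symm⟩
      · obtain ⟨u, hu, hul⟩ := List.mem_map.mp h
        exact ⟨u, List.mem_cons_of_mem _ hu, hul ▸ (hid ▸ rfl)⟩
    -- qes = products of the subsets of minimal length
    have hqes : ((s :: t).filter (fun x => (x.length : Int) == ideal)).foldl
        (fun qes subset => qes ++ [subset.foldl (fun ans weight => ans * weight) 1]) []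
        = ((s :: t).filter (fun x => (x.length : Int) == ideal)).map pvProd := by
      rw [PySem.List.foldl_append_singleton_eq_map]; rfl
    set qes : List Int := ((s :: t).filter (fun x => (x.length : Int) == ideal)).map pvProd with hq
    have hqne : qes ≠ [] := by
      obtain ⟨u, hu, hul⟩ := hatt
      have : u ∈ (s :: t).filter (fun x => (x.length : Int) == ideal) :=
        List.mem_filter.mpr ⟨hu, by simp [hul]⟩
      simp only [hq, ne_eq, List.map_eq_nil_iff]
      exact fun h => absurd (h ▸ this) (List.not_mem_nil)
    obtain ⟨mA, hmA⟩ : ∃ m, PySem.List.min? qes (fun y => y) = some m := by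
      rcases h : PySem.List.min? qes (fun y => y) with _ | m
      · exact absurd ((PySem.List.min?_eq_none_iff _ _).mp h) hqne
      · exact ⟨m, rfl⟩
    have hAval : min_qe (s :: t) = mA := by
      unfold min_qe
      rw [hideal]
      simp only [hqes, hmA]
    -- (ideal, mA) is a member of the pair list and is its lexicographic minimum
    have hmAmem := PySem.List.min?_mem hmA
    have hmAmin := PySem.List.min?_isMin hmA
    obtain ⟨u0, hu0f, hu0p⟩ := List.mem_map.mp hmAmem
    have hu0 := List.mem_filter.mp hu0f
    have hu0len : (u0.length : Int) = ideal := by simpa using hu0.2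
    have hApair_mem : (ideal, mA) ∈ (s :: t).map pairf := by
      refine List.mem_map.mpr ⟨u0, hu0.1, ?_⟩
      simp [hpairf, hu0len, hu0p]
    have hApair_min : ∀ p ∈ (s :: t).map pairf, lexle (ideal, mA) p := by
      intro p hp
      obtain ⟨u, hu, hup⟩ := List.mem_map.mp hp
      rcases lt_or_eq_of_le (hle u hu) with h | h
      · exact Or.inl (by simp [← hup, hpairf]; exact h)
      · refine Or.inr ⟨by simp [← hup, hpairf, ← h], ?_⟩
        have : u ∈ (s :: t).filter (fun x => (x.length : Int) == ideal) :=
          List.mem_filter.mpr ⟨hu, by simp [← h]⟩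
        have := hmAmin (pvProd u) (List.mem_map_of_mem this)
        simpa [← hup, hpairf] using this
    -- ===== B side =====
    obtain ⟨rB, hrB, hrBmem, hrBa, hrBmin⟩ := min2_cons_spec (t.map pairf) (pairf s)
    have hBval : min_qe_alt (s :: t) = rB.2 := by
      unfold min_qe_alt
      simp only [List.map_cons]
      rw [show ((s.length : Int), pvProd s) = pairf s from rfl,
        show List.map (fun s : List Int => ((s.length : Int), pvProd s)) t = List.map pairf t from rfl,
        hrB]
    -- the two minима coincide
    have hrBmem' : rB ∈ (s :: t).map pairf := by
      simp only [List.map_cons]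
      rcases hrBmem with h | h
      · exact h ▸ List.mem_cons_self
      · exact List.mem_cons_of_mem _ h
    have h1 : lexle (ideal, mA) rB := hApair_min rB hrBmem'
    have h2 : lexle rB (ideal, mA) := by
      have hm := hApair_mem
      rw [List.map_cons] at hm
      rcases List.mem_cons.mp hm with h | h
      · exact h ▸ hrBa
      · exact hrBmin _ h
    have := lexle_antisymm h1 h2
    rw [hAval, hBval, ← this]
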